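-- pv_equiv track=rewrite | github.com/arturfarriols/MedicalApp | models/utils.py | find_sequence_end_indexes
-- ===== SOURCE A (Python) =====
-- def find_sequence_end_indexes(arr):
--     increasing_indexes = []
--     decreasing_indexes = []
--
--     if len(arr) == 0:
--         return increasing_indexes, decreasing_indexes
--
--     current_sequence = arr[0]
--     current_index = 0
--
--     for i in range(1, len(arr)):
--         if arr[i] != current_sequence:
--             if current_sequence == "increasing":
--                 increasing_indexes.append(i - 1)
--             else:
--                 decreasing_indexes.append(i - 1)
--             current_sequence = arr[i]
--             current_index = i
--
--     # Append the last index, as the loop will not include it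
--     if current_sequence == "increasing":
--         increasing_indexes.append(len(arr) - 1)
--     else:
--         decreasing_indexes.append(len(arr) - 1)
--
--     return increasing_indexes, decreasing_indexes
-- ===== SOURCE B (Python) =====
-- def find_sequence_end_indexes(arr):
--     # Two-pass: build a run-length encoding of consecutive equal values,
--     # then map run lengths to run-end indexes.
--     runs = []  # list of (value, length) for maximal runs of equal values
--     for v in arr:
--         if runs and runs[-1][0] == v:
--             runs[-1] = (v, runs[-1][1] + 1)
--         else:
--             runs.append((v, 1))
--     increasing_indexes = []
--     decreasing_indexes = []
--     end = -1
--     for v, length in runs: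
--         end += length
--         if v == "increasing":
--             increasing_indexes.append(end)
--         else:
--             decreasing_indexes.append(end)
--     return increasing_indexes, decreasing_indexes
-- ===== Notes on version B (the rewrite author's own statement) =====
-- stated objective: alternative
-- what changed: A's single transition-detecting index loop with a current-sequence register and a special final append is replaced by a two-pass decomposition: first build a run-length encoding of maximal runs of equal values, then turn run lengths into run-end indexes with a running index, which handles the last run and the empty list uniformly.
import Mathlib
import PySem

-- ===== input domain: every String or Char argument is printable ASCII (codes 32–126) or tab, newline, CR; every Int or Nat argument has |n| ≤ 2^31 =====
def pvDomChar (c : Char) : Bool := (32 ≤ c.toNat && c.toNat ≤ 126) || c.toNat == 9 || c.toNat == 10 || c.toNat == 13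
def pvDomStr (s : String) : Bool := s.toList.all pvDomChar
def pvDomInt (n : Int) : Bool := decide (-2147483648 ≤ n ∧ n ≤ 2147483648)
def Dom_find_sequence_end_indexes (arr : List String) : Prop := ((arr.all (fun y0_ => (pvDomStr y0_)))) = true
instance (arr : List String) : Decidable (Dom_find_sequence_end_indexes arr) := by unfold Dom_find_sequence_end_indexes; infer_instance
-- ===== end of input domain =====

-- B replaces A's transition-detecting index loop by a two-pass run-length-encoding decomposition (alternative; same cost).

-- ===== PORT A =====
-- state: (current_sequence, current_index, increasing_indexes, decreasing_indexes)
def find_sequence_end_indexes (arr : List String) : List Int × List Int :=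
  match arr with
  | [] => ([], [])
  | _ =>
    let st := (PySem.List.pyRange 1 (arr.length : Int) 1).foldl
      (fun (s : String × Int × List Int × List Int) i =>
        if PySem.List.pyGetD arr i "" ≠ s.1 then
          if s.1 = "increasing" then
            (PySem.List.pyGetD arr i "", i, s.2.2.1 ++ [i - 1], s.2.2.2)
          else
            (PySem.List.pyGetD arr i "", i, s.2.2.1, s.2.2.2 ++ [i - 1])
        else s)
      (PySem.List.pyGetD arr 0 "", 0, [], [])
    if st.1 = "increasing" then (st.2.2.1 ++ [(arr.length : Int) - 1], st.2.2.2)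
    else (st.2.2.1, st.2.2.2 ++ [(arr.length : Int) - 1])

-- ===== PORT B =====
-- pass 1: run-length encoding (append a new run, or bump the last run's count)
def pvRunsStep (runs : List (String × Int)) (v : String) : List (String × Int) :=
  match runs.getLast? with
  | some last => if last.1 = v then runs.dropLast ++ [(v, last.2 + 1)] else runs ++ [(v, 1)]
  | none => runs ++ [(v, 1)]

def find_sequence_end_indexes_alt (arr : List String) : List Int × List Int :=
  let runs := arr.foldl pvRunsStep []
  -- pass 2: running end index over the runs
  let st := runs.foldl
    (fun (s : Int × List Int × List Int) r =>
      let e := s.1 + r.2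
      if r.1 = "increasing" then (e, s.2.1 ++ [e], s.2.2) else (e, s.2.1, s.2.2 ++ [e]))
    (-1, [], [])
  (st.2.1, st.2.2)

-- ===== PRECONDITION & SPEC =====
def Spec_find_sequence_end_indexes (arr : List String) (out : List Int × List Int) : Prop := out = find_sequence_end_indexes_alt arr
instance (arr : List String) (out : List Int × List Int) : Decidable (Spec_find_sequence_end_indexes arr out) := by unfold Spec_find_sequence_end_indexes; infer_instance

-- ===== CLAIM (what is proved, stated in full; the proofs are below) =====
def Claim_equal_find_sequence_end_indexes : Prop := ∀ (arr : List String), Dom_find_sequence_end_indexes arr → Spec_find_sequence_end_indexes arr (find_sequence_end_indexes arr)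

-- ===== LEMMAS AND PROOFS =====

-- canonical run-length encoding of cs^n ++ xs, head-recursive
def pvRleAux (cs : String) (n : Int) : List String → List (String × Int)
  | [] => [(cs, n)]
  | x :: xs => if cs = x then pvRleAux cs (n + 1) xs else (cs, n) :: pvRleAux x 1 xs

-- recursive model of A's loop body over the tail of the array
def pvStepA (s : String × Int × List Int × List Int) (i : Int) (x : String) :
    String × Int × List Int × List Int :=
  if x ≠ s.1 then
    if s.1 = "increasing" then (x, i, s.2.2.1 ++ [i - 1], s.2.2.2)
    else (x, i, s.2.2.1, s.2.2.2 ++ [i - 1])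
  else s

def pvGoA : List String → Int → (String × Int × List Int × List Int) →
    String × Int × List Int × List Int
  | [], _, s => s
  | x :: xs, i, s => pvGoA xs (i + 1) (pvStepA s i x)

def pvFinish (s : String × Int × List Int × List Int) (last : Int) : List Int × List Int :=
  if s.1 = "increasing" then (s.2.2.1 ++ [last], s.2.2.2) else (s.2.2.1, s.2.2.2 ++ [last])

-- A's suffix contribution: remaining xs, current sequence cs, next index i
def pvFA : List String → String → Int → List Int × List Int
  | [], cs, i => if cs = "increasing" then ([i - 1], []) else ([], [i - 1])
  | x :: xs, cs, i =>
    if x ≠ cs then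
      let r := pvFA xs x (i + 1)
      if cs = "increasing" then ((i - 1) :: r.1, r.2) else (r.1, (i - 1) :: r.2)
    else pvFA xs cs (i + 1)

-- B's suffix contribution from runs, with running end index e
def pvEmit : List (String × Int) → Int → List Int × List Int
  | [], _ => ([], [])
  | r :: rest, e =>
    let i := pvEmit rest (e + r.2)
    if r.1 = "increasing" then ((e + r.2) :: i.1, i.2) else (i.1, (e + r.2) :: i.2)

theorem pv_fold_runs (xs : List String) (rs : List (String × Int)) (cs : String) (n : Int) :
    xs.foldl pvRunsStep (rs ++ [(cs, n)]) = rs ++ pvRleAux cs n xs := by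
  induction xs generalizing rs cs n with
  | nil => simp [pvRleAux]
  | cons x xs ih =>
    simp only [List.foldl_cons, pvRunsStep, List.getLast?_concat, List.dropLast_concat, pvRleAux]
    by_cases h : cs = x
    · subst h
      simp [ih]
    · simp only [if_neg h, List.append_assoc]
      rw [show rs ++ ([(cs, n)] ++ [(x, 1)]) = (rs ++ [(cs, n)]) ++ [(x, 1)] by simp,
        ih _ _ _]
      simp

theorem pv_fold_emit (rs : List (String × Int)) (e : Int) (inc dec : List Int) :
    (rs.foldl
      (fun (s : Int × List Int × List Int) r =>
        let e := s.1 + r.2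
        if r.1 = "increasing" then (e, s.2.1 ++ [e], s.2.2) else (e, s.2.1, s.2.2 ++ [e]))
      (e, inc, dec)).2 = (inc ++ (pvEmit rs e).1, dec ++ (pvEmit rs e).2) := by
  induction rs generalizing e inc dec with
  | nil => simp [pvEmit]
  | cons r rest ih =>
    simp only [List.foldl_cons, pvEmit]
    by_cases h : r.1 = "increasing" <;> simp [h, ih]

theorem pv_loopA_eq (arr : List String) :
    ∀ (k : Nat) (t : List String), arr.drop k = t →
    ∀ (s : String × Int × List Int × List Int),
    (PySem.List.pyRange (k : Int) (arr.length : Int) 1).foldl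
      (fun s i => pvStepA s i (PySem.List.pyGetD arr i "")) s
      = pvGoA t (k : Int) s := by
  intro k t
  induction t generalizing k with
  | nil =>
    intro ht s
    have hk : arr.length ≤ k := by
      have := congrArg List.length ht
      simp at this
      omega
    rw [PySem.List.pyRange_one_eq_nil (by exact_mod_cast hk)]
    simp [pvGoA]
  | cons x xs ih =>
    intro ht s
    have hk : k < arr.length := by
      have := congrArg List.length ht
      simp at this
      omega
    rw [PySem.List.pyRange_one_cons (by exact_mod_cast hk)]
    have hget : PySem.List.pyGetD arr (k : Int) "" = x := by
      rw [PySem.List.pyGetD_natCast]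
      have h0 : (arr.drop k)[0]? = some x := by rw [ht]; rfl
      rw [List.getElem?_drop] at h0
      simp only [Nat.add_zero] at h0
      simp [List.getD, h0]
    have hdrop : arr.drop (k + 1) = xs := by
      have h1 : arr.drop (k + 1) = (arr.drop k).drop 1 := by rw [List.drop_drop]
      rw [h1, ht]
      rfl
    have hcast : ((k : Int) + 1) = ((k + 1 : Nat) : Int) := by push_cast; ring
    simp only [List.foldl_cons, pvGoA, hget, hcast]
    exact ih (k + 1) hdrop _

theorem pv_goA_fA (t : List String) :
    ∀ (cs : String) (ci : Int) (inc dec : List Int) (i : Int),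
    pvFinish (pvGoA t i (cs, ci, inc, dec)) (i + t.length - 1)
      = (inc ++ (pvFA t cs i).1, dec ++ (pvFA t cs i).2) := by
  induction t with
  | nil =>
    intro cs ci inc dec i
    by_cases h : cs = "increasing" <;> simp [pvGoA, pvFinish, pvFA, h]
  | cons x xs ih =>
    intro cs ci inc dec i
    have hlen : i + ((x :: xs).length : Int) - 1 = (i + 1) + (xs.length : Int) - 1 := by
      simp; ring
    rw [hlen]
    by_cases hx : x = cs
    · have hstep : pvStepA (cs, ci, inc, dec) i x = (cs, ci, inc, dec) := by
        simp [pvStepA, hx]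
      show pvFinish (pvGoA xs (i + 1) (pvStepA (cs, ci, inc, dec) i x)) _ = _
      rw [hstep, ih cs ci inc dec (i + 1)]
      simp [pvFA, hx]
    · by_cases hcs : cs = "increasing"
      · subst hcs
        have hstep : pvStepA ("increasing", ci, inc, dec) i x = (x, i, inc ++ [i - 1], dec) := by
          simp [pvStepA, hx]
        show pvFinish (pvGoA xs (i + 1) (pvStepA ("increasing", ci, inc, dec) i x)) _ = _
        rw [hstep, ih x i (inc ++ [i - 1]) dec (i + 1)]
        simp [pvFA, hx]
      · have hstep : pvStepA (cs, ci, inc, dec) i x = (x, i, inc, dec ++ [i - 1]) := by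
          simp [pvStepA, hx, hcs]
        show pvFinish (pvGoA xs (i + 1) (pvStepA (cs, ci, inc, dec) i x)) _ = _
        rw [hstep, ih x i inc (dec ++ [i - 1]) (i + 1)]
        simp [pvFA, hx, hcs]

theorem pv_fA_emit (xs : List String) :
    ∀ (cs : String) (n i : Int), pvFA xs cs i = pvEmit (pvRleAux cs n xs) (i - n - 1) := by
  induction xs with
  | nil =>
    intro cs n i
    have he : i - n - 1 + n = i - 1 := by ring
    by_cases h : cs = "increasing" <;> simp [pvFA, pvRleAux, pvEmit, h, he]
  | cons x xs ih =>
    intro cs n i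
    by_cases hx : x = cs
    · subst hx
      show pvFA (x :: xs) x i = pvEmit (pvRleAux x n (x :: xs)) (i - n - 1)
      unfold pvFA pvRleAux
      rw [if_pos rfl]
      simp only [ne_eq, not_true_eq_false, if_false]
      rw [ih x (n + 1) (i + 1)]
      congr 1
      ring
    · have hcx : ¬ cs = x := fun h => hx h.symm
      unfold pvFA pvRleAux
      rw [if_neg hcx]
      simp only [ne_eq, hx, not_false_iff, if_true, pvEmit]
      have he : i - n - 1 + n = i - 1 := by ring
      rw [ih x 1 (i + 1)]
      have h2 : i + 1 - 1 - 1 = i - 1 := by ring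
      rw [h2, he]

-- ===== VERDICT (by name: the statement is the Claim_ definition above) =====
theorem find_sequence_end_indexes_spec : Claim_equal_find_sequence_end_indexes := by
  intro arr _
  unfold Spec_find_sequence_end_indexes
  match arr with
  | [] => rfl
  | a :: t =>
    show find_sequence_end_indexes (a :: t) = find_sequence_end_indexes_alt (a :: t)
    unfold find_sequence_end_indexes find_sequence_end_indexes_alt
    simp only []
    have hA : (PySem.List.pyRange ((1 : Nat) : Int) (((a :: t).length : Nat) : Int) 1).foldl
        (fun s i => pvStepA s i (PySem.List.pyGetD (a :: t) i ""))
        (PySem.List.pyGetD (a :: t) 0 "", 0, [], [])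
        = pvGoA t 1 (a, 0, ([] : List Int), ([] : List Int)) := by
      have := pv_loopA_eq (a :: t) 1 t rfl (a, 0, [], [])
      simpa [PySem.List.pyGetD_zero_cons] using this
    have hfold : (PySem.List.pyRange 1 ((a :: t).length : Int) 1).foldl
        (fun (s : String × Int × List Int × List Int) i =>
          if PySem.List.pyGetD (a :: t) i "" ≠ s.1 then
            if s.1 = "increasing" then
              (PySem.List.pyGetD (a :: t) i "", i, s.2.2.1 ++ [i - 1], s.2.2.2)
            else
              (PySem.List.pyGetD (a :: t) i "", i, s.2.2.1, s.2.2.2 ++ [i - 1])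
          else s)
        (PySem.List.pyGetD (a :: t) 0 "", 0, [], [])
        = pvGoA t 1 (a, 0, [], []) := by
      simpa [pvStepA] using hA
    have hrun : (a :: t).foldl pvRunsStep [] = pvRleAux a 1 t := by
      have := pv_fold_runs t ([] : List (String × Int)) a 1
      simpa [pvRunsStep] using this
    have hfin : pvFinish (pvGoA t 1 (a, 0, [], [])) (((a :: t).length : Int) - 1)
        = ((pvFA t a 1).1, (pvFA t a 1).2) := by
      have := pv_goA_fA t a 0 [] [] 1
      have hl : (1 : Int) + (t.length : Int) - 1 = ((a :: t).length : Int) - 1 := by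
        simp
      rw [hl] at this
      simpa using this
    have hB := pv_fold_emit (pvRleAux a 1 t) (-1) [] []
    have hfe : pvFA t a 1 = pvEmit (pvRleAux a 1 t) (-1) := by
      have := pv_fA_emit t a 1 1
      simpa using this
    rw [hfold, hrun]
    -- reduce both finishes
    have hL : (if (pvGoA t 1 (a, 0, [], [])).1 = "increasing" then
        ((pvGoA t 1 (a, 0, [], [])).2.2.1 ++ [((a :: t).length : Int) - 1],
          (pvGoA t 1 (a, 0, [], [])).2.2.2)
      else
        ((pvGoA t 1 (a, 0, [], [])).2.2.1,
          (pvGoA t 1 (a, 0, [], [])).2.2.2 ++ [((a :: t).length : Int) - 1]))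
        = pvFinish (pvGoA t 1 (a, 0, [], [])) (((a :: t).length : Int) - 1) := rfl
    rw [hL, hfin, hfe]
    rw [hB]
    simp
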